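-- pv_equiv track=rewrite | github.com/DesalegnTamirat/A2SV-Code-Submission | camp/leetcode/minimum-moves-to-reach-target-score.py | minMoves
-- ===== SOURCE A (Python) =====
-- def minMoves(target: int, maxDoubles: int) -> int:
--     total_moves = 0
--     while target > 1:
--         if maxDoubles > 0:
--             # if it is even only use double
--             if target % 2 == 0:
--                 total_moves += 1
--             else:
--                 total_moves += 2
--             # if odd doubling and adding
--             target //= 2
--             maxDoubles -= 1
--         else:
--             total_moves += target - 1
--             target = 1
--
--     return total_moves
-- ===== SOURCE B (Python) =====
-- def minMoves(target: int, maxDoubles: int) -> int: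
--     # Closed form: d doublings are used (bounded by maxDoubles and by the
--     # bit length of target); each odd low bit forces one extra increment,
--     # and the remaining high part is reached by pure increments.
--     if target <= 1:
--         return 0
--     d = min(max(maxDoubles, 0), target.bit_length() - 1)
--     pow2 = 1 << d
--     return d + bin(target % pow2).count("1") + target // pow2 - 1
-- ===== Notes on version B (the rewrite author's own statement) =====
-- stated objective: alternative
-- what changed: Replaces the halving loop with a closed-form expression over the binary representation: d = min(max(maxDoubles,0), bit_length-1) doublings, popcount of the low d bits for the forced increments, plus (target >> d) - 1 remaining increments.
import Mathlib
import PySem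

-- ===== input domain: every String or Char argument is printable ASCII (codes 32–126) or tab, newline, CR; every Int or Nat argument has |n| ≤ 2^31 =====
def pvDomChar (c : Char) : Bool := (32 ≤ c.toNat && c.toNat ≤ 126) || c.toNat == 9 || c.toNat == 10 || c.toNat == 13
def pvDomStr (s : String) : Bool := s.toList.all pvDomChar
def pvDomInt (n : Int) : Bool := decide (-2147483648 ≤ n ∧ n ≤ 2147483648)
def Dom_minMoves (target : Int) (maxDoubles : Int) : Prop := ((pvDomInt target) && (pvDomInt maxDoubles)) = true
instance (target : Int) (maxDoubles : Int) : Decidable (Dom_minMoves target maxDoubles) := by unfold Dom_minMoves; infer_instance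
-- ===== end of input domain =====

-- B replaces A's halving loop by a closed-form expression over target's binary
-- representation (doublings used + popcount of the low bits + remaining increments).

-- ===== PORT A =====
def minMovesAux (target : Int) (maxDoubles : Int) (acc : Int) : Int :=
  if target > 1 then
    if maxDoubles > 0 then
      minMovesAux (PySem.Int.floordiv target 2) (maxDoubles - 1)
        (acc + (if PySem.Int.mod target 2 = 0 then 1 else 2))
    else
      minMovesAux 1 maxDoubles (acc + (target - 1))
  else acc
termination_by target.toNat
decreasing_by
  · rw [PySem.Int.floordiv_eq_ediv_of_pos (by omega : (0:Int) < 2)]; omega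
  · omega

def minMoves (target : Int) (maxDoubles : Int) : Int :=
  minMovesAux target maxDoubles 0

-- ===== PORT B =====
def minMoves_alt (target : Int) (maxDoubles : Int) : Int :=
  if target ≤ 1 then 0
  else
    let d := min (max maxDoubles 0) ((PySem.Int.bitLength target : Int) - 1)
    let pow2 : Int := 2 ^ d.toNat
    d + (PySem.Int.bitCount (PySem.Int.mod target pow2) : Int)
      + PySem.Int.floordiv target pow2 - 1

-- ===== PRECONDITION & SPEC =====
def Spec_minMoves (target : Int) (maxDoubles : Int) (out : Int) : Prop := out = minMoves_alt target maxDoubles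
instance (target : Int) (maxDoubles : Int) (out : Int) : Decidable (Spec_minMoves target maxDoubles out) := by unfold Spec_minMoves; infer_instance

-- ===== CLAIM (what is proved, stated in full; the proofs are below) =====
def Claim_equal_minMoves : Prop := ∀ (target : Int) (maxDoubles : Int), Dom_minMoves target maxDoubles → Spec_minMoves target maxDoubles (minMoves target maxDoubles)

-- ===== LEMMAS AND PROOFS =====

/-- The closed-form expression of B, without the `target ≤ 1` guard. -/
def Fform (t m : Int) : Int :=
  let d := min (max m 0) ((PySem.Int.bitLength t : Int) - 1)
  let pow2 : Int := 2 ^ d.toNat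
  d + (PySem.Int.bitCount (PySem.Int.mod t pow2) : Int)
    + PySem.Int.floordiv t pow2 - 1

lemma bitLength_ge_two (t : Int) (ht : 2 ≤ t) : 2 ≤ PySem.Int.bitLength t := by
  by_contra h
  have h1 : PySem.Int.bitLength t ≤ 1 := by omega
  have h2 := PySem.Int.lt_two_pow_bitLength t
  have h3 : (2:Nat) ^ PySem.Int.bitLength t ≤ 2 ^ 1 :=
    Nat.pow_le_pow_right (by omega) h1
  have h4 : t.natAbs < 2 := by omega
  omega

lemma alt_eq_F (t m : Int) (ht : 1 ≤ t) : minMoves_alt t m = Fform t m := by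
  rcases eq_or_lt_of_le ht with h1 | h2
  · have ht1 : t = 1 := h1.symm
    subst ht1
    have hbl : PySem.Int.bitLength (1:Int) = 1 := by decide
    have hd : min (max m 0) ((PySem.Int.bitLength (1:Int) : Int) - 1) = 0 := by
      rw [hbl]; omega
    simp only [minMoves_alt, Fform, hd]
    norm_num

  · simp only [minMoves_alt, Fform]
    rw [if_neg (by omega)]

lemma F_base (t m : Int) (ht : 2 ≤ t) (hm : m ≤ 0) : Fform t m = t - 1 := by
  have hbl := bitLength_ge_two t ht
  have hd : min (max m 0) ((PySem.Int.bitLength t : Int) - 1) = 0 := by omega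
  simp only [Fform, hd]
  have h1 : (2:Int) ^ (0:Int).toNat = 1 := by decide
  rw [h1]
  rw [PySem.Int.mod_eq_emod_of_pos (by omega), PySem.Int.floordiv_eq_ediv_of_pos (by omega)]
  simp [PySem.Int.bitCount_zero]

/-- bitCount splits off the lowest bit (Nat version). -/
lemma bc_split (a r : Nat) (hr : r < 2) :
    PySem.Int.bitCount ((2 * a + r : Nat) : Int) = r + PySem.Int.bitCount ((a : Nat) : Int) := by
  rcases Nat.eq_zero_or_pos (2 * a + r) with h0 | hp
  · have ha : a = 0 := by omega
    have hr0 : r = 0 := by omega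
    subst ha; subst hr0; simp [PySem.Int.bitCount_zero]
  · rw [PySem.Int.bitCount_natCast hp]
    have h1 : (2 * a + r) % 2 = r := by omega
    have h2 : (2 * a + r) / 2 = a := by omega
    rw [h1, h2]

lemma mod_split (n p : Nat) (_hp : 0 < p) :
    n % (2 * p) = 2 * ((n / 2) % p) + n % 2 := by
  have h := Nat.mod_mul (a := 2) (b := p) (x := n)
  omega

lemma F_step (t m : Int) (ht : 2 ≤ t) (hm : 1 ≤ m) :
    Fform t m = (if PySem.Int.mod t 2 = 0 then 1 else 2)
      + Fform (PySem.Int.floordiv t 2) (m - 1) := by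
  obtain ⟨n, rfl⟩ : ∃ n : Nat, t = (n : Int) := ⟨t.toNat, by omega⟩
  have hn : 2 ≤ n := by exact_mod_cast ht
  have hfd : PySem.Int.floordiv (n : Int) (2 : Int) = ((n / 2 : Nat) : Int) := by
    exact_mod_cast PySem.Int.floordiv_natCast n 2
  have hmod2 : PySem.Int.mod (n : Int) (2 : Int) = ((n % 2 : Nat) : Int) := by
    exact_mod_cast PySem.Int.mod_natCast n 2
  have hL2 : 2 ≤ PySem.Int.bitLength (n : Int) := bitLength_ge_two _ ht
  have hLrec : PySem.Int.bitLength (n : Int) = PySem.Int.bitLength ((n / 2 : Nat) : Int) + 1 :=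
    PySem.Int.bitLength_natCast (by omega)
  simp only [Fform, hfd, hmod2]
  set L' : Nat := PySem.Int.bitLength ((n / 2 : Nat) : Int) with hL'
  rw [hLrec]
  set d' : Int := min (max (m - 1) 0) ((L' : Int) - 1) with hd'def
  have hL'1 : 1 ≤ L' := by omega
  have hd : min (max m 0) (((L' + 1 : Nat) : Int) - 1) = d' + 1 := by
    rw [hd'def]
    simp only [min_def, max_def]
    push_cast
    split_ifs <;> omega
  rw [hd]
  have hd'0 : 0 ≤ d' := by
    rw [hd'def]; simp only [min_def, max_def]; split_ifs <;> omega
  have hk : (d' + 1).toNat = d'.toNat + 1 := by omega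
  rw [hk]
  set k' : Nat := d'.toNat with hk'
  -- rewrite the power, mod, floordiv of the LHS into Nat casts
  have hpowL : ((2 : Int) ^ (k' + 1)) = ((2 ^ (k' + 1) : Nat) : Int) := by push_cast; ring
  have hpowR : ((2 : Int) ^ k') = ((2 ^ k' : Nat) : Int) := by push_cast; ring
  rw [hpowL, hpowR, PySem.Int.mod_natCast, PySem.Int.floordiv_natCast,
    PySem.Int.mod_natCast, PySem.Int.floordiv_natCast]
  -- Nat-level splitting facts
  have hp2 : (2 : Nat) ^ (k' + 1) = 2 * 2 ^ k' := by ring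
  have hmodsplit : n % 2 ^ (k' + 1) = 2 * ((n / 2) % 2 ^ k') + n % 2 := by
    rw [hp2]; exact mod_split n (2 ^ k') (Nat.pow_pos (by omega))
  have hdivsplit : n / 2 ^ (k' + 1) = (n / 2) / 2 ^ k' := by
    rw [hp2, Nat.div_div_eq_div_mul, Nat.mul_comm]
  have hbc : PySem.Int.bitCount ((n % 2 ^ (k' + 1) : Nat) : Int)
      = n % 2 + PySem.Int.bitCount (((n / 2) % 2 ^ k' : Nat) : Int) := by
    rw [hmodsplit]; exact bc_split _ _ (Nat.mod_lt _ (by omega))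
  rw [hbc, hdivsplit]
  rcases Nat.mod_two_eq_zero_or_one n with h2 | h2 <;>
    simp only [h2] <;> [rw [if_pos (by norm_num)]; rw [if_neg (by norm_num)]] <;>
    push_cast <;> ring

lemma aux_eq (t m acc : Int) : minMovesAux t m acc = acc + minMoves_alt t m := by
  induction t, m, acc using minMovesAux.induct with
  | case1 t m acc h1 h2 ih =>
    simp only [dite_eq_ite] at ih
    rw [minMovesAux, if_pos h1, if_pos h2, ih,
      alt_eq_F t m (by omega), F_step t m (by omega) (by omega),
      alt_eq_F (PySem.Int.floordiv t 2) (m - 1)]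
    · ring
    · rw [PySem.Int.floordiv_eq_ediv_of_pos (by omega)]; omega
  | case2 t m acc h1 h2 ih =>
    rw [minMovesAux, if_pos h1, if_neg h2, ih,
      alt_eq_F t m (by omega), F_base t m (by omega) (by omega)]
    have h0 : minMoves_alt 1 m = 0 := by rw [minMoves_alt, if_pos (by omega)]
    rw [h0]; ring
  | case3 t m acc h1 =>
    rw [minMovesAux, if_neg h1]
    rw [minMoves_alt, if_pos (by omega)]
    ring

-- ===== VERDICT (by name: the statement is the Claim_ definition above) =====
theorem minMoves_spec : Claim_equal_minMoves := by
  intro t m _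
  unfold Spec_minMoves minMoves
  rw [aux_eq]
  omega
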